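-- pv_equiv track=rewrite | github.com/JBTastic/Advent-of-code | 2025/Day02/solution.py | find_invalid_ids_1
-- ===== SOURCE A (Python) =====
-- def find_invalid_ids_1(start: int, end: int) -> list[int]:
--     invalid_ids = []
--
--     for num in range(start, end + 1):
--         num = str(num)
--         num_digits = len(num)
--         is_valid = True
--
--         # check if number has two identical halves
--         if num_digits % 2 != 0:
--             continue
--
--         # split number in two halves
--         num_half = num_digits // 2
--         digits1 = num[0:num_half]
--         digits2 = num[num_half:num_digits]
--
--         # check if both halves are identical
--         if digits1 == digits2:
--             is_valid = False
--         else: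
--             is_valid = True
--
--         if not is_valid:
--             invalid_ids.append(int(num))
--
--     return invalid_ids
-- ===== SOURCE B (Python) =====
-- def find_invalid_ids_1(start: int, end: int) -> list[int]:
--     # A number has two identical string halves iff it equals x * (10**k + 1)
--     # for some k >= 1 and x with exactly k digits (10**(k-1) <= x < 10**k).
--     # Enumerate those directly per even digit length, clipped to [start, end].
--     invalid_ids = []
--     if end >= 10:
--         max_k = len(str(end)) // 2
--         for k in range(1, max_k + 1):
--             m = 10 ** k + 1
--             lo = max(10 ** (k - 1), -((-start) // m))  # ceil(start / m)
--             hi = min(10 ** k - 1, end // m)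
--             for x in range(lo, hi + 1):
--                 invalid_ids.append(x * m)
--     return invalid_ids
-- ===== Notes on version B (the rewrite author's own statement) =====
-- stated objective: faster
-- what changed: Instead of scanning every integer in [start, end] and string-testing it for two identical halves, B enumerates the solutions directly as x*(10^k+1) for each even digit length 2k with x ranging over the k-digit numbers clipped to the range, producing the same ascending list.
import Mathlib
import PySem

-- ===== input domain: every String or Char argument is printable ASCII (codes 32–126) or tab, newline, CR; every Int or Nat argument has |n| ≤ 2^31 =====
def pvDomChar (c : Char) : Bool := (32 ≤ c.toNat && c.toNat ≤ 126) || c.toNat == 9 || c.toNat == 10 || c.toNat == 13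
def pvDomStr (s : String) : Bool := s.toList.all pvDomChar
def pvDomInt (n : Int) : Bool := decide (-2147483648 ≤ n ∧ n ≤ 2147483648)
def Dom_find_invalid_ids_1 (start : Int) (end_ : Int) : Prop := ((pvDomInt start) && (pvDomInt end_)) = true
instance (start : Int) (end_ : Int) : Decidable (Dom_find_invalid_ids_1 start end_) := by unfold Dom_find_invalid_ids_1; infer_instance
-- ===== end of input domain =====

-- ===== PORT A =====
-- A scans every integer in [start, end] and keeps those whose str() has even
-- length and two identical halves.  `int(num)` (num = str of the loop integer)
-- is ported as the loop integer itself: int ∘ str is the identity on Python ints (exact).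
def find_invalid_ids_1 (start : Int) (end_ : Int) : List Int :=
  (PySem.List.pyRange start (end_ + 1) 1).foldl
    (fun invalid_ids num =>
      let numS := PySem.Int.toChars num            -- num = str(num)
      let num_digits := PySem.List.len numS        -- len(num)
      if PySem.Int.mod num_digits 2 ≠ 0 then invalid_ids   -- continue
      else
        let num_half := PySem.Int.floordiv num_digits 2
        let digits1 := PySem.List.slice numS (some 0) (some num_half)
        let digits2 := PySem.List.slice numS (some num_half) (some num_digits)
        let is_valid := if digits1 = digits2 then false else true
        if is_valid = false then invalid_ids ++ [num] else invalid_ids)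
    []

-- ===== PORT B =====
-- B enumerates the answers directly: for each half-length k, the numbers with two
-- identical halves are x * (10^k + 1) with x a k-digit number, clipped to [start, end].
-- 10 ** e is ported as (10 : Int) ^ e.toNat (exact: e ≥ 0 on every use here).
def find_invalid_ids_1_alt (start : Int) (end_ : Int) : List Int :=
  if 10 ≤ end_ then
    let max_k := PySem.Int.floordiv (PySem.List.len (PySem.Int.toChars end_)) 2    -- len(str(end)) // 2 (end > 0 here)
    (PySem.List.pyRange 1 (max_k + 1) 1).foldl
      (fun invalid_ids k =>
        let m := (10 : Int) ^ k.toNat + 1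
        let lo := max ((10 : Int) ^ (k - 1).toNat) (-(PySem.Int.floordiv (-start) m))  -- ceil(start / m)
        let hi := min ((10 : Int) ^ k.toNat - 1) (PySem.Int.floordiv end_ m)
        (PySem.List.pyRange lo (hi + 1) 1).foldl
          (fun acc x => acc ++ [x * m]) invalid_ids)
      []
  else []

-- ===== PRECONDITION & SPEC =====
def Spec_find_invalid_ids_1 (start : Int) (end_ : Int) (out : List Int) : Prop := out = find_invalid_ids_1_alt start end_
instance (start : Int) (end_ : Int) (out : List Int) : Decidable (Spec_find_invalid_ids_1 start end_ out) := by unfold Spec_find_invalid_ids_1; infer_instance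

-- ===== CLAIM (what is proved, stated in full; the proofs are below) =====
def Claim_equal_find_invalid_ids_1 : Prop := ∀ (start : Int) (end_ : Int), Dom_find_invalid_ids_1 start end_ → Spec_find_invalid_ids_1 start end_ (find_invalid_ids_1 start end_)

-- ===== LEMMAS AND PROOFS =====

-- digit-char facts
theorem pvDigitChar_toNat (a : Nat) (h : a < 10) : (Nat.digitChar a).toNat = 48 + a := by
  interval_cases a <;> rfl

theorem pvDigitChar_inj (a b : Nat) (ha : a < 10) (hb : b < 10)
    (h : Nat.digitChar a = Nat.digitChar b) : a = b := by
  have := pvDigitChar_toNat a ha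
  have := pvDigitChar_toNat b hb
  have : (Nat.digitChar a).toNat = (Nat.digitChar b).toNat := by rw [h]
  omega

theorem pvDigitChar_ne_neg (a : Nat) (h : a < 10) : Nat.digitChar a ≠ '-' := by
  intro he
  have := pvDigitChar_toNat a h
  rw [he] at this
  simp at this; omega

-- digits-length bracket
theorem pvDigits_len_eq (x k : Nat) (h1 : 10 ^ (k - 1) ≤ x) (h2 : x < 10 ^ k) (hk : 1 ≤ k) :
    (Nat.digits 10 x).length = k := by
  have hx : x ≠ 0 := by
    have : 0 < 10 ^ (k - 1) := Nat.pow_pos (n := k-1) (by norm_num)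
    omega
  rw [Nat.length_digits 10 x (by norm_num) hx]
  have : Nat.log 10 x = k - 1 := Nat.log_eq_of_pow_le_of_lt_pow h1 (by
    have : k - 1 + 1 = k := by omega
    rw [this]; exact h2)
  omega

theorem pvDigits_len_lower (m l : Nat) (h : 10 ^ l ≤ m) : l < (Nat.digits 10 m).length := by
  by_contra hc
  push Not at hc
  have h2 : m < 10 ^ (Nat.digits 10 m).length := Nat.lt_base_pow_length_digits (by norm_num)
  have : (10:Nat) ^ (Nat.digits 10 m).length ≤ 10 ^ l := Nat.pow_le_pow_right (by norm_num) hc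
  omega

theorem pvDigits_bounds (m : Nat) (hm : m ≠ 0) :
    10 ^ ((Nat.digits 10 m).length - 1) ≤ m ∧ m < 10 ^ (Nat.digits 10 m).length := by
  constructor
  · rw [Nat.length_digits 10 m (by norm_num) hm]
    simpa using Nat.pow_log_le_self 10 hm
  · exact Nat.lt_base_pow_length_digits (by norm_num)

theorem pvToDigitsCore_eq (fuel : Nat) : ∀ (n : Nat) (acc : List Char), 0 < n → n < fuel →
    Nat.toDigitsCore 10 fuel n acc = ((Nat.digits 10 n).map Nat.digitChar).reverse ++ acc := by
  induction fuel with
  | zero => intro n acc h1 h2; omega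
  | succ f ih =>
    intro n acc h1 h2
    unfold Nat.toDigitsCore
    by_cases h10 : n / 10 = 0
    · rw [if_pos h10]
      rw [Nat.digits_def' (by norm_num) h1, h10]
      simp
    · rw [if_neg h10]
      rw [ih (n / 10) _ (Nat.pos_of_ne_zero h10) (by omega)]
      rw [Nat.digits_def' (by norm_num) h1]
      simp

theorem pvToChars_pos (n : Int) (h : 0 < n) :
    PySem.Int.toChars n = ((Nat.digits 10 n.toNat).map Nat.digitChar).reverse := by
  rw [PySem.Int.toChars, if_neg (by omega), Nat.toDigits,
    pvToDigitsCore_eq _ _ _ (by omega) (by omega)]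
  simp

theorem pvToChars_neg (n : Int) (h : n < 0) :
    PySem.Int.toChars n = '-' :: ((Nat.digits 10 n.natAbs).map Nat.digitChar).reverse := by
  rw [PySem.Int.toChars, if_pos h, Nat.toDigits,
    pvToDigitsCore_eq _ _ _ (by omega) (by omega)]
  simp

-- the boolean A really tests (proof-side restatement of A's loop body condition)
def pvCheck (num : Int) : Bool :=
  let numS := PySem.Int.toChars num
  let nd := PySem.List.len numS
  if PySem.Int.mod nd 2 ≠ 0 then false
  else decide (PySem.List.slice numS (some 0) (some (PySem.Int.floordiv nd 2)) =
               PySem.List.slice numS (some (PySem.Int.floordiv nd 2)) (some nd))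

theorem pvCheck_eq (n : Int) :
    pvCheck n = (decide ((PySem.Int.toChars n).length % 2 = 0) &&
      decide ((PySem.Int.toChars n).take ((PySem.Int.toChars n).length / 2) =
       (PySem.Int.toChars n).drop ((PySem.Int.toChars n).length / 2))) := by
  unfold pvCheck
  simp only []
  set cs := PySem.Int.toChars n with hcs
  have hlen : PySem.List.len cs = ((cs.length : Nat) : Int) := by simp [PySem.List.len_eq]
  have hmod : PySem.Int.mod ((cs.length : Nat) : Int) 2 = ((cs.length % 2 : Nat) : Int) := by
    exact_mod_cast PySem.Int.mod_natCast cs.length 2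
  have hdiv : PySem.Int.floordiv ((cs.length : Nat) : Int) 2 = ((cs.length / 2 : Nat) : Int) := by
    exact_mod_cast PySem.Int.floordiv_natCast cs.length 2
  simp only [hlen, hmod, hdiv]
  have hslice1 : PySem.List.slice cs (some 0) (some ((cs.length / 2 : Nat) : Int)) =
      cs.take (cs.length / 2) := by
    rw [PySem.List.slice_zero_start, PySem.List.slice_to_natCast]
  have hslice2 : PySem.List.slice cs (some ((cs.length / 2 : Nat) : Int)) (some ((cs.length : Nat) : Int)) =
      cs.drop (cs.length / 2) := by
    rw [PySem.List.slice_natCast]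
    exact List.take_of_length_le (by simp)
  rw [hslice1, hslice2]
  by_cases hp : cs.length % 2 = 0
  · simp [hp]
  · have h1 : ¬ ((2:Int) ∣ (cs.length : Int)) := by
      omega
    simp [hp, h1]

theorem pvMapDigitChar_inj (l1 : List Nat) : ∀ (l2 : List Nat), (∀ d ∈ l1, d < 10) → (∀ d ∈ l2, d < 10) →
    l1.map Nat.digitChar = l2.map Nat.digitChar → l1 = l2 := by
  induction l1 with
  | nil => intro l2 _ _ h; cases l2 <;> simp_all
  | cons a t ih =>
    intro l2 h1 h2 h
    cases l2 with
    | nil => simp_all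
    | cons b t2 =>
      simp only [List.map_cons, List.cons.injEq] at h
      have := pvDigitChar_inj a b (h1 a (by simp)) (h2 b (by simp)) h.1
      rw [this, ih t2 (fun d hd => h1 d (by simp [hd])) (fun d hd => h2 d (by simp [hd])) h.2]

theorem pvCheck_iff (n : Int) : pvCheck n = true ↔
    ∃ k x : Nat, 1 ≤ k ∧ 10 ^ (k - 1) ≤ x ∧ x < 10 ^ k ∧ n = (x : Int) * ((10 : Int) ^ k + 1) := by
  by_cases hn : 0 < n
  · constructor
    · intro hc
      rw [pvCheck_eq, pvToChars_pos n hn] at hc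
      set m := n.toNat with hm
      have hm0 : m ≠ 0 := by omega
      set L := Nat.digits 10 m with hL
      simp only [Bool.and_eq_true, decide_eq_true_eq, List.length_reverse, List.length_map] at hc
      obtain ⟨heven, htd⟩ := hc
      have hL0 : L ≠ [] := by rw [hL]; exact Nat.digits_ne_nil_iff_ne_zero.mpr hm0
      set k := L.length / 2 with hk
      have hlen2 : L.length = 2 * k := by omega
      have hk1 : 1 ≤ k := by
        have : L.length ≠ 0 := by simpa using hL0
        omega
      rw [List.take_reverse, List.drop_reverse] at htd
      simp only [List.length_map, hlen2] at htd
      have h2k : 2 * k - k = k := by omega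
      rw [h2k] at htd
      have htd' : L.drop k = L.take k := by
        apply pvMapDigitChar_inj
        · intro d hd; exact Nat.digits_lt_base (by norm_num) (List.mem_of_mem_drop (by rw [← hL]; exact hd))
        · intro d hd; exact Nat.digits_lt_base (by norm_num) (List.mem_of_mem_take (by rw [← hL]; exact hd))
        · have := List.reverse_injective htd
          simpa [List.map_drop, List.map_take] using this
      have hdiv : m / 10 ^ k = Nat.ofDigits 10 (L.drop k) := Nat.self_div_pow_eq_ofDigits_drop k m (by norm_num)
      have hmod : m % 10 ^ k = Nat.ofDigits 10 (L.take k) := Nat.self_mod_pow_eq_ofDigits_take k m (by norm_num)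
      have heq : m / 10 ^ k = m % 10 ^ k := by rw [hdiv, hmod, htd']
      have hpow : 0 < (10:Nat) ^ k := Nat.pow_pos (by norm_num)
      have hxlt : m % 10 ^ k < 10 ^ k := Nat.mod_lt _ hpow
      obtain ⟨hlow, hhigh⟩ := pvDigits_bounds m hm0
      rw [← hL, hlen2] at hlow hhigh
      have hxge : 10 ^ (k - 1) ≤ m / 10 ^ k := by
        rw [Nat.le_div_iff_mul_le hpow]
        calc 10 ^ (k - 1) * 10 ^ k = 10 ^ (2 * k - 1) := by
              rw [← Nat.pow_add]; congr 1; omega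
          _ ≤ m := hlow
      refine ⟨k, m % 10 ^ k, hk1, by omega, hxlt, ?_⟩
      have hmeq : m = (m % 10 ^ k) * (10 ^ k + 1) := by
        have := Nat.div_add_mod m (10 ^ k)
        nlinarith [heq]
      have : (m : Int) = ((m % 10 ^ k : Nat) : Int) * (((10 ^ k : Nat) : Int) + 1) := by
        exact_mod_cast congrArg (Nat.cast : Nat → Int) hmeq
      push_cast at this ⊢
      rw [show n = (m : Int) from (Int.toNat_of_nonneg (by omega)).symm]
      exact this
    · rintro ⟨k, x, hk, hx1, hx2, hxe⟩
      have hx0 : x ≠ 0 := by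
        have : 0 < (10:Nat) ^ (k - 1) := Nat.pow_pos (by norm_num)
        omega
      have hmeq : n.toNat = x * (10 ^ k + 1) := by
        have : ((n.toNat : Int)) = ((x * (10 ^ k + 1) : Nat) : Int) := by
          rw [Int.toNat_of_nonneg (by omega), hxe]; push_cast; ring
        exact_mod_cast this
      set L0 := Nat.digits 10 x with hL0
      have hlen0 : L0.length = k := pvDigits_len_eq x k hx1 hx2 hk
      have hof : Nat.ofDigits 10 (L0 ++ L0) = n.toNat := by
        rw [Nat.ofDigits_append]
        rw [show Nat.ofDigits 10 L0 = x from Nat.ofDigits_digits 10 x]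
        rw [hlen0, hmeq]
        ring
      have hdig : Nat.digits 10 n.toNat = L0 ++ L0 := by
        rw [← hof]
        apply Nat.digits_ofDigits 10 (by norm_num)
        · intro l hl
          rcases List.mem_append.mp hl with h | h <;>
            exact Nat.digits_lt_base (by norm_num) h
        · intro h
          have hne : L0 ≠ [] := by simpa using Nat.digits_ne_nil_iff_ne_zero.mpr hx0
          rw [List.getLast_append_right (l' := L0) hne]
          exact Nat.getLast_digit_ne_zero 10 hx0
      rw [pvCheck_eq, pvToChars_pos n hn, hdig]
      set R := (L0.map Nat.digitChar).reverse with hR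
      have hRlen : R.length = k := by simp [hR, hlen0]
      have hrev : ((L0 ++ L0).map Nat.digitChar).reverse = R ++ R := by
        simp [hR, List.map_append, List.reverse_append]
      rw [hrev]
      have hlenRR : (R ++ R).length = 2 * k := by simp [hRlen]; omega
      rw [hlenRR]
      have h2 : 2 * k % 2 = 0 := by omega
      have hdv : 2 * k / 2 = k := by omega
      rw [h2, hdv]
      simp only [decide_eq_true_eq, Bool.and_eq_true]
      refine ⟨trivial, ?_⟩
      rw [List.take_left' hRlen, List.drop_left' hRlen]
  · constructor
    · intro hc
      exfalso
      rcases lt_trichotomy n 0 with hlt | heq0 | hgt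
      · rw [pvCheck_eq, pvToChars_neg n hlt] at hc
        set ds := ((Nat.digits 10 n.natAbs).map Nat.digitChar).reverse with hds
        set cs := '-' :: ds with hcs
        simp only [Bool.and_eq_true, decide_eq_true_eq] at hc
        obtain ⟨heven, htd⟩ := hc
        set k := cs.length / 2 with hk
        have hlcs : cs.length = ds.length + 1 := by simp [hcs]
        have hk1 : 1 ≤ k := by
          have : cs.length ≠ 1 := by
            intro h1
            rw [h1] at heven
            omega
          have : 1 ≤ cs.length := by simp [hcs]
          omega
        have h0 : (cs.take k)[0]? = some '-' := by
          rw [List.getElem?_take_of_lt (by omega)]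
          simp [hcs]
        have h1 : (cs.drop k)[0]? = cs[k]? := by
          rw [List.getElem?_drop]
          simp
        have hlen2 : cs.length = 2 * k := by omega
        have hkd : k - 1 < ds.length := by omega
        have hmem : ds[k-1] ∈ ds := List.getElem_mem hkd
        have hde : ∃ d ∈ Nat.digits 10 n.natAbs, Nat.digitChar d = ds[k-1] := by
          have hmem' : ds[k-1] ∈ (List.map Nat.digitChar (Nat.digits 10 n.natAbs)).reverse := hmem
          rw [List.mem_reverse] at hmem'
          exact List.mem_map.mp hmem' 
        obtain ⟨d, hdmem, hdchar⟩ := hde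
        have hd10 : d < 10 := Nat.digits_lt_base (by norm_num) hdmem
        have hck : cs[k]? = some ds[k-1] := by
          rw [hcs]
          rw [List.getElem?_cons]
          rw [if_neg (by omega)]
          rw [List.getElem?_eq_getElem hkd]
        have : some '-' = some (Nat.digitChar d) := by
          rw [← h0, htd, h1, hck, hdchar]
        exact pvDigitChar_ne_neg d hd10 (by injection this with h; exact h.symm)
      · rw [heq0] at hc
        have : pvCheck 0 = false := by decide
        rw [this] at hc
        exact Bool.false_ne_true hc
      · omega
    · rintro ⟨k, x, hk, hx1, hx2, hxe⟩
      exfalso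
      have hx0 : 1 ≤ x := by
        have : 0 < (10:Nat) ^ (k - 1) := Nat.pow_pos (by norm_num)
        omega
      have h1 : (1:Int) ≤ (x : Int) := by exact_mod_cast hx0
      have h2 : (2:Int) ≤ (10:Int) ^ k + 1 := by
        have : (1:Int) ≤ (10:Int) ^ k := one_le_pow₀ (by norm_num)
        omega
      nlinarith

-- ===== list-level machinery =====
def pvM (k : Int) : Int := (10 : Int) ^ k.toNat + 1
def pvLo (start : Int) (k : Int) : Int :=
  max ((10 : Int) ^ (k - 1).toNat) (-(PySem.Int.floordiv (-start) (pvM k)))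
def pvHi (end_ : Int) (k : Int) : Int :=
  min ((10 : Int) ^ k.toNat - 1) (PySem.Int.floordiv end_ (pvM k))
def pvBlock (start : Int) (end_ : Int) (k : Int) : List Int :=
  (PySem.List.pyRange (pvLo start k) (pvHi end_ k + 1) 1).map (fun x => x * pvM k)
def pvMaxk (end_ : Int) : Int :=
  PySem.Int.floordiv (PySem.List.len (PySem.Int.toChars end_)) 2

theorem pvA_eq (start end_ : Int) : find_invalid_ids_1 start end_ =
    (PySem.List.pyRange start (end_ + 1) 1).filter pvCheck := by
  unfold find_invalid_ids_1
  have hbody : (fun (invalid_ids : List Int) (num : Int) =>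
      let numS := PySem.Int.toChars num
      let num_digits := PySem.List.len numS
      if PySem.Int.mod num_digits 2 ≠ 0 then invalid_ids
      else
        let num_half := PySem.Int.floordiv num_digits 2
        let digits1 := PySem.List.slice numS (some 0) (some num_half)
        let digits2 := PySem.List.slice numS (some num_half) (some num_digits)
        let is_valid := if digits1 = digits2 then false else true
        if is_valid = false then invalid_ids ++ [num] else invalid_ids) =
      (fun acc num => if pvCheck num = true then acc ++ [id num] else acc) := by
    funext acc num
    simp only []
    have hpv : pvCheck num = (if PySem.Int.mod (PySem.List.len (PySem.Int.toChars num)) 2 ≠ 0 then false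
      else decide (PySem.List.slice (PySem.Int.toChars num) (some 0)
          (some (PySem.Int.floordiv (PySem.List.len (PySem.Int.toChars num)) 2)) =
        PySem.List.slice (PySem.Int.toChars num)
          (some (PySem.Int.floordiv (PySem.List.len (PySem.Int.toChars num)) 2))
          (some (PySem.List.len (PySem.Int.toChars num))))) := rfl
    rw [hpv]
    by_cases h1 : PySem.Int.mod (PySem.List.len (PySem.Int.toChars num)) 2 ≠ 0
    · rw [if_pos h1, if_pos h1]
      simp
    · rw [if_neg h1, if_neg h1]
      by_cases h2 : PySem.List.slice (PySem.Int.toChars num) (some 0)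
          (some (PySem.Int.floordiv (PySem.List.len (PySem.Int.toChars num)) 2)) =
        PySem.List.slice (PySem.Int.toChars num)
          (some (PySem.Int.floordiv (PySem.List.len (PySem.Int.toChars num)) 2))
          (some (PySem.List.len (PySem.Int.toChars num)))
      · simp
      · simp
  rw [hbody, PySem.List.foldl_append_if pvCheck id]
  simp

theorem pvB_eq (start end_ : Int) : find_invalid_ids_1_alt start end_ =
    if 10 ≤ end_ then
      (PySem.List.pyRange 1 (pvMaxk end_ + 1) 1).flatMap (pvBlock start end_)
    else [] := by
  unfold find_invalid_ids_1_alt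
  by_cases h : 10 ≤ end_
  · rw [if_pos h, if_pos h]
    simp only []
    have hbody : (fun (invalid_ids : List Int) (k : Int) =>
        let m := (10 : Int) ^ k.toNat + 1
        let lo := max ((10 : Int) ^ (k - 1).toNat) (-(PySem.Int.floordiv (-start) m))
        let hi := min ((10 : Int) ^ k.toNat - 1) (PySem.Int.floordiv end_ m)
        (PySem.List.pyRange lo (hi + 1) 1).foldl (fun acc x => acc ++ [x * m]) invalid_ids) =
        (fun acc k => acc ++ pvBlock start end_ k) := by
      funext acc k
      show List.foldl (fun acc x => acc ++ [x * pvM k]) acc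
          (PySem.List.pyRange (pvLo start k) (pvHi end_ k + 1) 1) = acc ++ pvBlock start end_ k
      rw [PySem.List.foldl_append_singleton_eq_map (fun x => x * pvM k)]
      rfl
    rw [hbody, PySem.List.foldl_append_eq_flatMap]
    rfl
  · rw [if_neg h, if_neg h]

theorem pvM_pos (k : Int) : 0 < pvM k := by
  unfold pvM
  have : (0:Int) < 10 ^ k.toNat := pow_pos (by norm_num) _
  omega

theorem pvMem_block (start end_ k n : Int) :
    n ∈ pvBlock start end_ k ↔ ∃ x : Int,
      (10 : Int) ^ (k - 1).toNat ≤ x ∧ x ≤ (10 : Int) ^ k.toNat - 1 ∧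
      start ≤ x * pvM k ∧ x * pvM k ≤ end_ ∧ n = x * pvM k := by
  unfold pvBlock
  rw [List.mem_map]
  constructor
  · rintro ⟨x, hx, rfl⟩
    rw [PySem.List.mem_pyRange_one] at hx
    obtain ⟨hlo, hhi⟩ := hx
    unfold pvLo at hlo
    unfold pvHi at hhi
    rw [max_le_iff] at hlo
    have hhi' : x ≤ min ((10 : Int) ^ k.toNat - 1) (PySem.Int.floordiv end_ (pvM k)) := by omega
    rw [le_min_iff] at hhi'
    refine ⟨x, hlo.1, hhi'.1, ?_, ?_, rfl⟩
    · have h2 := hlo.2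
      have h3 : -x ≤ PySem.Int.floordiv (-start) (pvM k) := by omega
      rw [PySem.Int.le_floordiv_iff_mul_le (pvM_pos k)] at h3
      nlinarith [pvM_pos k]
    · have h4 := hhi'.2
      rw [PySem.Int.le_floordiv_iff_mul_le (pvM_pos k)] at h4
      exact h4
  · rintro ⟨x, h1, h2, h3, h4, rfl⟩
    refine ⟨x, ?_, rfl⟩
    rw [PySem.List.mem_pyRange_one]
    constructor
    · unfold pvLo
      rw [max_le_iff]
      refine ⟨h1, ?_⟩
      have : -x ≤ PySem.Int.floordiv (-start) (pvM k) := by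
        rw [PySem.Int.le_floordiv_iff_mul_le (pvM_pos k)]
        nlinarith [pvM_pos k]
      omega
    · unfold pvHi
      have : x ≤ PySem.Int.floordiv end_ (pvM k) := by
        rw [PySem.Int.le_floordiv_iff_mul_le (pvM_pos k)]
        exact h4
      omega

theorem pvBlock_bounds (start end_ k n : Int) (hk : 1 ≤ k) (hn : n ∈ pvBlock start end_ k) :
    (10 : Int) ^ (2 * k.toNat - 1) ≤ n ∧ n ≤ (10 : Int) ^ (2 * k.toNat) - 1 := by
  rw [pvMem_block] at hn
  obtain ⟨x, h1, h2, _, _, rfl⟩ := hn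
  have hkt : (k - 1).toNat = k.toNat - 1 := by omega
  have hm : pvM k = (10 : Int) ^ k.toNat + 1 := rfl
  have hpow : (10 : Int) ^ (k.toNat - 1) * (10 : Int) ^ k.toNat = (10 : Int) ^ (2 * k.toNat - 1) := by
    rw [← pow_add]; congr 1; omega
  have hpow2 : (10 : Int) ^ k.toNat * (10 : Int) ^ k.toNat = (10 : Int) ^ (2 * k.toNat) := by
    rw [← pow_add]; congr 1; omega
  rw [hkt] at h1
  constructor
  · rw [hm]
    have h0 : (0 : Int) ≤ (10 : Int) ^ (k.toNat - 1) := by positivity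
    nlinarith [mul_le_mul_of_nonneg_right h1 (show (0:Int) ≤ (10:Int) ^ k.toNat + 1 by positivity)]
  · rw [hm]
    nlinarith [mul_le_mul_of_nonneg_right h2 (show (0:Int) ≤ (10:Int) ^ k.toNat + 1 by positivity)]

theorem pvB_pairwise (start end_ : Int) :
    ((PySem.List.pyRange 1 (pvMaxk end_ + 1) 1).flatMap (pvBlock start end_)).Pairwise (· < ·) := by
  rw [List.pairwise_flatMap]
  constructor
  · intro k _
    unfold pvBlock
    apply List.Pairwise.map
    · intro a b hab
      exact mul_lt_mul_of_pos_right hab (pvM_pos k)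
    · exact PySem.List.pairwise_lt_pyRange_one _ _
  · apply List.Pairwise.imp_of_mem ?_ (PySem.List.pairwise_lt_pyRange_one 1 (pvMaxk end_ + 1))
    intro k1 k2 hm1 hm2 hlt x hx y hy
    rw [PySem.List.mem_pyRange_one] at hm1 hm2
    have hk1 : 1 ≤ k1 := hm1.1
    have hk2 : 1 ≤ k2 := hm2.1
    have hb1 := pvBlock_bounds start end_ k1 x hk1 hx
    have hb2 := pvBlock_bounds start end_ k2 y hk2 hy
    have hkt : 2 * k1.toNat ≤ 2 * k2.toNat - 1 := by omega
    have : (10 : Int) ^ (2 * k1.toNat) ≤ (10 : Int) ^ (2 * k2.toNat - 1) :=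
      pow_le_pow_right₀ (by norm_num) hkt
    omega

theorem pvMaxk_eq (end_ : Int) (h : 0 < end_) :
    pvMaxk end_ = (((Nat.digits 10 end_.toNat).length / 2 : Nat) : Int) := by
  unfold pvMaxk
  rw [pvToChars_pos end_ h]
  have : PySem.List.len ((List.map Nat.digitChar (Nat.digits 10 end_.toNat)).reverse) =
      (((Nat.digits 10 end_.toNat).length : Nat) : Int) := by
    simp [PySem.List.len_eq]
  rw [this]
  exact_mod_cast PySem.Int.floordiv_natCast (Nat.digits 10 end_.toNat).length 2

theorem pvMem_main (start end_ n : Int) (h10 : 10 ≤ end_) :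
    n ∈ (PySem.List.pyRange 1 (pvMaxk end_ + 1) 1).flatMap (pvBlock start end_) ↔
    (start ≤ n ∧ n < end_ + 1 ∧ pvCheck n = true) := by
  rw [List.mem_flatMap]
  constructor
  · rintro ⟨k, hkmem, hnb⟩
    rw [PySem.List.mem_pyRange_one] at hkmem
    rw [pvMem_block] at hnb
    obtain ⟨x, hx1, hx2, hx3, hx4, rfl⟩ := hnb
    refine ⟨hx3, by omega, ?_⟩
    rw [pvCheck_iff]
    have hk1 : 1 ≤ k := hkmem.1
    set a := k.toNat with ha'
    have ha : 1 ≤ a := by omega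
    have hkt : (k - 1).toNat = a - 1 := by omega
    rw [hkt] at hx1
    have hxpos : (0:Int) ≤ x := by
      have : (0:Int) < (10:Int) ^ (a - 1) := pow_pos (by norm_num) _
      omega
    refine ⟨a, x.toNat, ha, ?_, ?_, ?_⟩
    · have hcast : ((10 ^ (a - 1) : Nat) : Int) ≤ x := by push_cast; exact hx1
      omega
    · have hcast : x < ((10 ^ a : Nat) : Int) := by push_cast; omega
      omega
    · rw [Int.toNat_of_nonneg hxpos]
      rfl
  · rintro ⟨hs, he, hc⟩
    rw [pvCheck_iff] at hc
    obtain ⟨kN, xN, hk, h1, h2, rfl⟩ := hc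
    have hxN : 1 ≤ xN := by
      have : 0 < 10 ^ (kN - 1) := Nat.pow_pos (by norm_num)
      omega
    have hple : (10:Int) ^ (2 * kN - 1) ≤ end_ := by
      have hlow : (10:Int) ^ (2 * kN - 1) ≤ (xN : Int) * ((10:Int) ^ kN + 1) := by
        have hc1 : ((10 ^ (kN - 1) : Nat) : Int) ≤ (xN : Int) := by exact_mod_cast h1
        have : (10:Int) ^ (kN - 1) * ((10:Int) ^ kN + 1) ≤ (xN : Int) * ((10:Int) ^ kN + 1) := by
          apply mul_le_mul_of_nonneg_right _ (by positivity)
          push_cast at hc1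
          exact hc1
        have hsplit : (10:Int) ^ (kN - 1) * (10:Int) ^ kN = (10:Int) ^ (2 * kN - 1) := by
          rw [← pow_add]; congr 1; omega
        nlinarith [pow_pos (show (0:Int) < 10 by norm_num) (kN - 1)]
      omega
    refine ⟨(kN : Int), ?_, ?_⟩
    · rw [PySem.List.mem_pyRange_one]
      refine ⟨by exact_mod_cast hk, ?_⟩
      rw [pvMaxk_eq end_ (by omega)]
      have hnat : 10 ^ (2 * kN - 1) ≤ end_.toNat := by
        have hcast : ((10 ^ (2 * kN - 1) : Nat) : Int) ≤ end_ := by push_cast; exact hple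
        omega
      have hlen := pvDigits_len_lower end_.toNat (2 * kN - 1) hnat
      have hfin : kN ≤ (Nat.digits 10 end_.toNat).length / 2 := by omega
      have : (kN : Int) ≤ (((Nat.digits 10 end_.toNat).length / 2 : Nat) : Int) := by
        exact_mod_cast hfin
      omega
    · rw [pvMem_block]
      have hmk : pvM (kN : Int) = (10:Int) ^ kN + 1 := by
        unfold pvM
        rw [Int.toNat_natCast]
      refine ⟨(xN : Int), ?_, ?_, ?_, ?_, ?_⟩
      · rw [show ((kN : Int) - 1).toNat = kN - 1 by omega]
        exact_mod_cast h1
      · rw [Int.toNat_natCast]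
        have : ((xN : Nat) : Int) < ((10 ^ kN : Nat) : Int) := by exact_mod_cast h2
        push_cast at this
        omega
      · rw [hmk]; exact hs
      · rw [hmk]; omega
      · rw [hmk]

theorem pvCheck_ge (n : Int) (hc : pvCheck n = true) : 11 ≤ n := by
  rw [pvCheck_iff] at hc
  obtain ⟨k, x, hk, h1, h2, rfl⟩ := hc
  have hx : 1 ≤ x := by
    have : 0 < 10 ^ (k - 1) := Nat.pow_pos (by norm_num)
    omega
  have hx' : (1:Int) ≤ (x : Int) := by exact_mod_cast hx
  have hp : (10:Int) ≤ (10:Int) ^ k := by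
    calc (10:Int) = 10 ^ 1 := by ring
      _ ≤ 10 ^ k := pow_le_pow_right₀ (by norm_num) hk
  nlinarith

theorem pvFilter_nil (start end_ : Int) (h : ¬ 10 ≤ end_) :
    (PySem.List.pyRange start (end_ + 1) 1).filter pvCheck = [] := by
  rw [List.filter_eq_nil_iff]
  intro a ha hc
  rw [PySem.List.mem_pyRange_one] at ha
  have := pvCheck_ge a hc
  omega

theorem pvAB (start end_ : Int) : find_invalid_ids_1 start end_ = find_invalid_ids_1_alt start end_ := by
  rw [pvA_eq, pvB_eq]
  by_cases h10 : 10 ≤ end_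
  · rw [if_pos h10]
    have hp1 : ((PySem.List.pyRange start (end_ + 1) 1).filter pvCheck).Pairwise (· < ·) :=
      List.Pairwise.sublist List.filter_sublist (PySem.List.pairwise_lt_pyRange_one _ _)
    have hp2 := pvB_pairwise start end_
    have hmem : ∀ a, a ∈ (PySem.List.pyRange start (end_ + 1) 1).filter pvCheck ↔
        a ∈ (PySem.List.pyRange 1 (pvMaxk end_ + 1) 1).flatMap (pvBlock start end_) := by
      intro a
      rw [List.mem_filter, PySem.List.mem_pyRange_one, pvMem_main start end_ a h10]
      tauto
    have hperm := (List.perm_ext_iff_of_nodup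
      (hp1.imp (fun h => ne_of_lt h)) (hp2.imp (fun h => ne_of_lt h))).mpr hmem
    exact List.Perm.eq_of_pairwise (fun a b _ _ hab hba => by omega) hp1 hp2 hperm
  · rw [if_neg h10]
    exact pvFilter_nil start end_ h10

-- ===== VERDICT (by name: the statement is the Claim_ definition above) =====
theorem find_invalid_ids_1_spec : Claim_equal_find_invalid_ids_1 := by
  intro start end_ _
  unfold Spec_find_invalid_ids_1
  exact pvAB start end_
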